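-- pv_equiv track=rewrite | github.com/DalgoT4D/DDP_backend | ddpui/core/dbt_automation/operations/rawsql.py | _split_columns_respecting_parentheses
-- ===== SOURCE A (Python) =====
-- def _split_columns_respecting_parentheses(select_clause: str) -> list:
--     """
--     Split column expressions by comma while respecting parentheses.
--     Example: "coalesce(a, b), c, sum(x, y) as total" -> ["coalesce(a, b)", "c", "sum(x, y) as total"]
--     """
--     if not select_clause:
--         return []
--
--     parts = []
--     current = ""
--     paren_count = 0
--
--     for char in select_clause:
--         if char == "(":
--             paren_count += 1
--         elif char == ")":
--             paren_count -= 1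
--         elif char == "," and paren_count == 0:
--             if current.strip():
--                 parts.append(current.strip())
--             current = ""
--             continue
--
--         current += char
--
--     if current.strip():
--         parts.append(current.strip())
--
--     return parts
-- ===== SOURCE B (Python) =====
-- def _split_columns_respecting_parentheses(select_clause: str) -> list:
--     # Two-pass: record the indices of top-level commas, then slice between them.
--     depth = 0
--     bounds = [-1]
--     for i, ch in enumerate(select_clause):
--         if ch == "(":
--             depth += 1
--         elif ch == ")":
--             depth -= 1
--         elif ch == "," and depth == 0:
--             bounds.append(i)
--     bounds.append(len(select_clause))
--     parts = []
--     for lo, hi in zip(bounds, bounds[1:]):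
--         seg = select_clause[lo + 1 : hi].strip()
--         if seg:
--             parts.append(seg)
--     return parts
-- ===== Notes on version B (the rewrite author's own statement) =====
-- stated objective: alternative
-- what changed: B replaces A's character-by-character segment accumulation with a two-pass scheme: one scan records the indices of top-level commas, then the string is sliced between consecutive boundary indices and each slice is stripped.
import Mathlib
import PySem

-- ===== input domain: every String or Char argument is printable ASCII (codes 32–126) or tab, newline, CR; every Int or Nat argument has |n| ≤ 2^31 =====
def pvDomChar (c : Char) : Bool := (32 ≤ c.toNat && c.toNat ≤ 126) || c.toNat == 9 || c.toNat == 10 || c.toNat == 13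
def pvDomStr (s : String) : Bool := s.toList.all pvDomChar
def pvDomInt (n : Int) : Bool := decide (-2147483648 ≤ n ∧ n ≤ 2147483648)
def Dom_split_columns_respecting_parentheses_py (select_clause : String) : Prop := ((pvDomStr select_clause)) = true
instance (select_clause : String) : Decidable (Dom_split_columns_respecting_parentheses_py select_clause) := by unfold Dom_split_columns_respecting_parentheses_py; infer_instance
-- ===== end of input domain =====

-- B records top-level comma indices in one scan and slices between them (different decomposition, same cost); A accumulates the current segment character by character.

-- ===== PORT A =====
def pvAStep (st : List String × List Char × Int) (ch : Char) : List String × List Char × Int :=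
  if ch = '(' then (st.1, st.2.1 ++ [ch], st.2.2 + 1)
  else if ch = ')' then (st.1, st.2.1 ++ [ch], st.2.2 - 1)
  else if ch = ',' ∧ st.2.2 = 0 then
    ((if PySem.Chars.strip st.2.1 ≠ [] then st.1 ++ [String.ofList (PySem.Chars.strip st.2.1)] else st.1), [], st.2.2)
  else (st.1, st.2.1 ++ [ch], st.2.2)

def split_columns_respecting_parentheses_py (select_clause : String) : List String :=
  if select_clause.toList = [] then []
  else
    let st := select_clause.toList.foldl pvAStep ([], [], 0)
    if PySem.Chars.strip st.2.1 ≠ [] then st.1 ++ [String.ofList (PySem.Chars.strip st.2.1)] else st.1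

-- ===== PORT B =====
def pvBScan (st : Int × List Int) (p : Int × Char) : Int × List Int :=
  if p.2 = '(' then (st.1 + 1, st.2)
  else if p.2 = ')' then (st.1 - 1, st.2)
  else if p.2 = ',' ∧ st.1 = 0 then (st.1, st.2 ++ [p.1])
  else st

def pvBSeg (cs : List Char) (parts : List String) (pr : Int × Int) : List String :=
  let seg := PySem.Chars.strip (PySem.Chars.slice cs (some (pr.1 + 1)) (some pr.2))
  if seg ≠ [] then parts ++ [String.ofList seg] else parts

def split_columns_respecting_parentheses_py_alt (select_clause : String) : List String :=
  let cs := select_clause.toList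
  let bounds := ((PySem.List.enumerate cs 0).foldl pvBScan (0, [-1])).2 ++ [(cs.length : Int)]
  (bounds.zip bounds.tail).foldl (pvBSeg cs) []

-- ===== PRECONDITION & SPEC =====
def Spec_split_columns_respecting_parentheses_py (select_clause : String) (out : List String) : Prop := out = split_columns_respecting_parentheses_py_alt select_clause
instance (select_clause : String) (out : List String) : Decidable (Spec_split_columns_respecting_parentheses_py select_clause out) := by unfold Spec_split_columns_respecting_parentheses_py; infer_instance

-- ===== CLAIM (what is proved, stated in full; the proofs are below) =====
def Claim_equal_split_columns_respecting_parentheses_py : Prop := ∀ (select_clause : String), Dom_split_columns_respecting_parentheses_py select_clause → Spec_split_columns_respecting_parentheses_py select_clause (split_columns_respecting_parentheses_py select_clause)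

-- ===== LEMMAS AND PROOFS =====

-- depth change of one character
def pvDelta (c : Char) (d : Int) : Int :=
  if c = '(' then d + 1 else if c = ')' then d - 1 else d

-- raw segments of cs between top-level commas, starting at depth d
def pvSegs : List Char → Int → List (List Char)
  | [], _ => [[]]
  | c :: cs, d =>
    if c = ',' ∧ d = 0 then [] :: pvSegs cs d
    else (pvSegs cs (pvDelta c d)).modifyHead (c :: ·)

-- positions (relative) of the top-level commas
def pvTop : List Char → Int → List Nat
  | [], _ => []
  | c :: cs, d =>
    if c = ',' ∧ d = 0 then 0 :: (pvTop cs d).map (· + 1)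
    else (pvTop cs (pvDelta c d)).map (· + 1)


theorem pvB_scan (cs : List Char) : ∀ (k d : Int) (bs : List Int),
    ((PySem.List.enumerate cs k).foldl pvBScan (d, bs)).2
      = bs ++ (pvTop cs d).map (fun j : Nat => k + (j : Int)) := by
  induction cs with
  | nil => intro k d bs; simp [PySem.List.enumerate_nil, pvTop]
  | cons c cs ih =>
    intro k d bs
    rw [PySem.List.enumerate_cons, List.foldl_cons]
    by_cases hc : c = ',' ∧ d = 0
    · have hstep : pvBScan (d, bs) (k, c) = (d, bs ++ [k]) := by simp [pvBScan, hc.1, hc.2]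
      have htop : pvTop (c :: cs) d = 0 :: (pvTop cs d).map (· + 1) := by
        simp [pvTop, hc.1, hc.2]
      rw [hstep, ih, htop, List.map_cons, List.map_map, List.append_assoc]
      simp only [Nat.cast_zero, add_zero, List.cons_append, List.nil_append]
      refine congrArg (fun t => bs ++ k :: t) (List.map_congr_left fun x _ => ?_)
      simp only [Function.comp_apply]
      push_cast
      ring
    · have hstep : pvBScan (d, bs) (k, c) = (pvDelta c d, bs) := by
        simp only [pvBScan, pvDelta]
        split_ifs <;> simp_all
      have htop : pvTop (c :: cs) d = (pvTop cs (pvDelta c d)).map (· + 1) := by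
        simp [pvTop, hc]
      rw [hstep, ih, htop, List.map_map]
      refine congrArg (bs ++ ·) (List.map_congr_left fun x _ => ?_)
      simp only [Function.comp_apply]
      push_cast
      ring

theorem pvTop_nil_segs (cs : List Char) : ∀ d : Int, pvTop cs d = [] → pvSegs cs d = [cs] := by
  induction cs with
  | nil => intro d _; rfl
  | cons c cs ih =>
    intro d h
    by_cases hc : c = ',' ∧ d = 0
    · simp [pvTop, hc.1, hc.2] at h
    · simp only [pvTop, if_neg hc, List.map_eq_nil_iff] at h
      simp [pvSegs, if_neg hc, ih _ h]

theorem pvTop_cons_spec (cs : List Char) : ∀ (d : Int) (j : Nat) (rest : List Nat),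
    pvTop cs d = j :: rest →
    j < cs.length ∧ pvSegs cs d = cs.take j :: pvSegs (cs.drop (j + 1)) 0 ∧
      rest = (pvTop (cs.drop (j + 1)) 0).map (· + (j + 1)) := by
  induction cs with
  | nil => intro d j rest h; simp [pvTop] at h
  | cons c cs ih =>
    intro d j rest h
    by_cases hc : c = ',' ∧ d = 0
    · rw [show pvTop (c :: cs) d = 0 :: (pvTop cs d).map (· + 1) from by
        simp [pvTop, hc.1, hc.2]] at h
      rw [List.cons.injEq] at h
      obtain ⟨hj, hrest⟩ := h
      subst hj hrest
      refine ⟨by simp, ?_, ?_⟩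
      · rw [show pvSegs (c :: cs) d = [] :: pvSegs cs d from by simp [pvSegs, hc.1, hc.2], hc.2]
        simp
      · rw [hc.2]
        simp
    · have htop' : pvTop (c :: cs) d = (pvTop cs (pvDelta c d)).map (· + 1) := by
        simp [pvTop, hc]
      rw [htop'] at h
      cases htop : pvTop cs (pvDelta c d) with
      | nil => rw [htop] at h; simp at h
      | cons j' rest' =>
        rw [htop, List.map_cons, List.cons.injEq] at h
        obtain ⟨hj, hrest⟩ := h
        obtain ⟨hlt, hsegs, hr⟩ := ih _ _ _ htop
        subst hj hrest
        refine ⟨by simp only [List.length_cons]; omega, ?_, ?_⟩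
        · rw [show pvSegs (c :: cs) d = (pvSegs cs (pvDelta c d)).modifyHead (c :: ·) from by
            simp [pvSegs, hc], hsegs]
          simp [List.take_succ_cons, List.drop_succ_cons]
        · rw [hr, List.map_map, List.drop_succ_cons]
          exact List.map_congr_left fun x _ => by simp only [Function.comp_apply]; omega

-- strip every raw segment, keep the non-empty ones
def pvPost (l : List (List Char)) : List String :=
  l.foldr (fun cur acc =>
    if PySem.Chars.strip cur ≠ [] then String.ofList (PySem.Chars.strip cur) :: acc else acc) []

theorem pvPost_cons (x : List Char) (t : List (List Char)) :
    pvPost (x :: t) =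
      (if PySem.Chars.strip x ≠ [] then [String.ofList (PySem.Chars.strip x)] else []) ++ pvPost t := by
  simp only [pvPost, List.foldr]; split_ifs <;> simp

theorem pvB_top_nil (cs pre : List Char) (d : Int) (parts : List String) (h : pvTop cs d = []) :
    ((((pre.length : Int) - 1) :: ((pvTop cs d).map (fun j : Nat => (pre.length : Int) + (j : Int)) ++ [((pre ++ cs).length : Int)])).zip
      ((pvTop cs d).map (fun j : Nat => (pre.length : Int) + (j : Int)) ++ [((pre ++ cs).length : Int)])).foldl (pvBSeg (pre ++ cs)) parts
      = parts ++ pvPost (pvSegs cs d) := by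
  rw [pvTop_nil_segs cs d h, h]
  simp only [List.map_nil, List.nil_append, List.zip_cons_cons, List.zip_nil_right,
    List.foldl_cons, List.foldl_nil]
  simp only [pvBSeg, PySem.Chars.slice_eq_listSlice]
  rw [show ((pre.length : Int) - 1) + 1 = ((pre.length : Nat) : Int) from by ring]
  rw [PySem.List.slice_natCast]
  rw [List.drop_left, List.length_append, Nat.add_sub_cancel_left, List.take_length]
  rw [pvPost_cons]
  split_ifs <;> simp [pvPost]

theorem pvB_pairs (n : Nat) : ∀ (cs pre : List Char) (d : Int) (parts : List String), cs.length ≤ n →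
    ((((pre.length : Int) - 1) :: ((pvTop cs d).map (fun j : Nat => (pre.length : Int) + (j : Int)) ++ [((pre ++ cs).length : Int)])).zip
      ((pvTop cs d).map (fun j : Nat => (pre.length : Int) + (j : Int)) ++ [((pre ++ cs).length : Int)])).foldl (pvBSeg (pre ++ cs)) parts
      = parts ++ pvPost (pvSegs cs d) := by
  induction n with
  | zero =>
    intro cs pre d parts hn
    have hcs : cs = [] := List.eq_nil_of_length_eq_zero (Nat.le_zero.mp hn)
    subst hcs
    exact pvB_top_nil [] pre d parts rfl
  | succ n ih =>
    intro cs pre d parts hn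
    cases htop : pvTop cs d with
    | nil => simpa [htop] using pvB_top_nil cs pre d parts htop
    | cons j rest =>
      obtain ⟨hlt, hsegs, hrest⟩ := pvTop_cons_spec cs d j rest htop
      set f : Nat → Int := fun j : Nat => (pre.length : Int) + (j : Int) with hf
      set pre' := pre ++ cs.take (j + 1) with hpre'
      set cs' := cs.drop (j + 1) with hcs'
      have e1 : pre' ++ cs' = pre ++ cs := by
        rw [hpre', hcs', List.append_assoc, List.take_append_drop]
      have elen : pre'.length = pre.length + (j + 1) := by
        rw [hpre', List.length_append, List.length_take, min_eq_left (by omega)]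
      have e2 : (pre'.length : Int) - 1 = f j := by rw [elen, hf]; push_cast; ring
      have e3 : (pvTop cs' 0).map (fun j : Nat => (pre'.length : Int) + (j : Int)) = rest.map f := by
        rw [hrest, List.map_map]
        refine (List.map_congr_left fun x _ => ?_).symm
        simp only [Function.comp_apply, hf, elen]
        push_cast
        ring
      have hlen' : cs'.length ≤ n := by rw [hcs', List.length_drop]; omega
      have hIH := ih cs' pre' 0 (pvBSeg (pre ++ cs) parts ((pre.length : Int) - 1, f j)) hlen'
      rw [e1, e2, e3] at hIH
      simp only [List.map_cons, List.cons_append, List.zip_cons_cons, List.foldl_cons]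
      rw [hIH]
      have hfirst : pvBSeg (pre ++ cs) parts ((pre.length : Int) - 1, f j)
          = if PySem.Chars.strip (cs.take j) ≠ [] then
              parts ++ [String.ofList (PySem.Chars.strip (cs.take j))] else parts := by
        simp only [pvBSeg, PySem.Chars.slice_eq_listSlice]
        rw [show ((pre.length : Int) - 1) + 1 = ((pre.length : Nat) : Int) from by ring,
          show f j = ((pre.length + j : Nat) : Int) from by simp only [hf]; push_cast; ring]
        rw [PySem.List.slice_natCast, List.drop_left, Nat.add_sub_cancel_left]
      rw [hfirst, hsegs, pvPost_cons]
      split_ifs <;> simp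

theorem pvMH (cur : List Char) (c : Char) (l : List (List Char)) :
    (l.modifyHead (c :: ·)).modifyHead (cur ++ ·) = l.modifyHead ((cur ++ [c]) ++ ·) := by
  cases l <;> simp

theorem pvA_fold (cs : List Char) : ∀ (parts : List String) (cur : List Char) (d : Int),
    (let st := cs.foldl pvAStep (parts, cur, d);
     if PySem.Chars.strip st.2.1 ≠ [] then st.1 ++ [String.ofList (PySem.Chars.strip st.2.1)] else st.1)
      = parts ++ pvPost ((pvSegs cs d).modifyHead (cur ++ ·)) := by
  induction cs with
  | nil =>
    intro parts cur d
    simp only [List.foldl_nil, pvSegs, List.modifyHead, pvPost, List.append_nil,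
      List.foldr]
    split_ifs <;> simp
  | cons c cs ih =>
    intro parts cur d
    simp only [List.foldl_cons]
    by_cases hc : c = ',' ∧ d = 0
    · have hstep : pvAStep (parts, cur, d) c =
        ((if PySem.Chars.strip cur ≠ [] then parts ++ [String.ofList (PySem.Chars.strip cur)] else parts), [], d) := by
        simp [pvAStep, hc.1, hc.2]
      have hseg : pvSegs (c :: cs) d = [] :: pvSegs cs d := by simp [pvSegs, hc.1, hc.2]
      have hid : (pvSegs cs d).modifyHead (fun x => [] ++ x) = pvSegs cs d := by
        cases h : pvSegs cs d <;> simp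
      rw [hstep, ih, hseg, hid]
      simp only [List.modifyHead_cons, List.append_nil, pvPost_cons]
      split_ifs <;> simp
    · have hstep : pvAStep (parts, cur, d) c = (parts, cur ++ [c], pvDelta c d) := by
        simp only [pvAStep, pvDelta]
        split_ifs <;> simp_all
      rw [hstep, ih]
      have hseg : pvSegs (c :: cs) d = (pvSegs cs (pvDelta c d)).modifyHead (c :: ·) := by
        simp [pvSegs, hc]
      rw [hseg, pvMH]


-- ===== VERDICT (by name: the statement is the Claim_ definition above) =====
theorem split_columns_respecting_parentheses_py_spec : Claim_equal_split_columns_respecting_parentheses_py := by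
  intro s _
  unfold Spec_split_columns_respecting_parentheses_py
  have hid : ∀ l : List (List Char), l.modifyHead (fun x => [] ++ x) = l := by
    intro l; cases l <;> simp
  have hA : split_columns_respecting_parentheses_py s = pvPost (pvSegs s.toList 0) := by
    unfold split_columns_respecting_parentheses_py
    split_ifs with h
    · rw [h]; rfl
    · have := pvA_fold s.toList [] [] 0
      rw [hid] at this
      simpa using this
  have hB : split_columns_respecting_parentheses_py_alt s = pvPost (pvSegs s.toList 0) := by
    unfold split_columns_respecting_parentheses_py_alt
    simp only [pvB_scan]
    have hp := pvB_pairs s.toList.length s.toList [] 0 [] le_rfl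
    simp only [List.length_nil, Nat.cast_zero, zero_sub, zero_add, List.nil_append] at hp ⊢
    simpa using hp
  rw [hA, hB]
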